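-- pv_equiv track=rewrite | github.com/Marvan-IT/ADAPTIVE-LEARNER | backend/src/adaptive/boredom_detector.py | select_engagement_strategy
-- ===== SOURCE A (Python) =====
-- ALL_STRATEGIES = ["challenge_bump", "real_world_hook", "context_switch", "micro_break"]
--
-- def select_engagement_strategy(
--     effective_engagement: list[str],
--     ineffective_engagement: list[str],
--     engagement_signal: str | None = None,
--     engagement: str | None = None,
-- ) -> str:
--     """Select the best engagement strategy based on effectiveness history.
--
--     Priority order:
--     1. Guard: OVERWHELMED students always receive 'micro_break' — never challenge_bump.
--     2. Strategies that have worked before (in effective_engagement)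
--     3. Strategies not yet tried (not in either list)
--     4. Strategies that have not worked (in ineffective_engagement) — last resort
--
--     Within each tier, strategies are selected in ALL_STRATEGIES order for
--     deterministic behavior.
--
--     Args:
--         effective_engagement: Strategies known to have worked for this student.
--         ineffective_engagement: Strategies known NOT to have worked for this student.
--         engagement_signal: Optional signal from the frontend (e.g. 'boredom_explicit').
--         engagement: Current engagement classification from LearningProfile
--                     ('BORED', 'ENGAGED', 'OVERWHELMED'). OVERWHELMED always → 'micro_break'.
--
--     Returns one of: 'challenge_bump', 'real_world_hook', 'context_switch', 'micro_break'
--     """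
--     # Guard: OVERWHELMED students must never receive challenge_bump
--     if engagement == "OVERWHELMED":
--         return "micro_break"
--
--     effective_set = set(effective_engagement or [])
--     ineffective_set = set(ineffective_engagement or [])
--
--     # Tier 1: known effective
--     for strategy in ALL_STRATEGIES:
--         if strategy in effective_set:
--             return strategy
--
--     # Tier 2: untested
--     for strategy in ALL_STRATEGIES:
--         if strategy not in effective_set and strategy not in ineffective_set:
--             return strategy
--
--     # Tier 3: last resort — least recently failed
--     for strategy in ALL_STRATEGIES:
--         if strategy in ineffective_set:
--             return strategy
--
--     # Fallback (should never reach here)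
--     return "challenge_bump"
-- ===== SOURCE B (Python) =====
-- ALL_STRATEGIES = ["challenge_bump", "real_world_hook", "context_switch", "micro_break"]
--
-- def select_engagement_strategy(
--     effective_engagement,
--     ineffective_engagement,
--     engagement_signal=None,
--     engagement=None,
-- ):
--     """Pick the strategy with the best effectiveness tier in one keyed pass."""
--     if engagement == "OVERWHELMED":
--         return "micro_break"
--     effective_set = set(effective_engagement or [])
--     ineffective_set = set(ineffective_engagement or [])
--
--     def priority(s):
--         return 1 if s in effective_set else (3 if s in ineffective_set else 2)
--
--     # min is stable: first minimal element keeps ALL_STRATEGIES tie-break order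
--     return min(ALL_STRATEGIES, key=priority)
-- ===== Notes on version B (the rewrite author's own statement) =====
-- stated objective: simpler
-- what changed: Replaced the three sequential tier scans over ALL_STRATEGIES (and the unreachable fallback) by a single keyed min over ALL_STRATEGIES with a 3-valued tier priority, relying on min's first-minimum stability for the tie-break order.
import Mathlib
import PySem

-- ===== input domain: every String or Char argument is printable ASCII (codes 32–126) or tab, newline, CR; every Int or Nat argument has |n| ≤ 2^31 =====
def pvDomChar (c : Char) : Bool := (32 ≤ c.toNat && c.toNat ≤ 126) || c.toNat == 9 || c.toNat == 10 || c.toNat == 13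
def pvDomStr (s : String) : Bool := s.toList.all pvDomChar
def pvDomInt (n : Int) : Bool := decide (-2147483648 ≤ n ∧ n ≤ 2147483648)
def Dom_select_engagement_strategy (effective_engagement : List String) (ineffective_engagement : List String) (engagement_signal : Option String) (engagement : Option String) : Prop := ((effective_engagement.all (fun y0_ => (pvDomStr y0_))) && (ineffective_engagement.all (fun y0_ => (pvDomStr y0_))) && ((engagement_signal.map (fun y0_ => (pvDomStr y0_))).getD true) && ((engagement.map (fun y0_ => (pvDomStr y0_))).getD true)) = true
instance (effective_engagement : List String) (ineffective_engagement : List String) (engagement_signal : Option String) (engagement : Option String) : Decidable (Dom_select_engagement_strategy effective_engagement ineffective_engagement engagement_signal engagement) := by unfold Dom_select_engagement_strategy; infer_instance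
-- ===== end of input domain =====

-- B replaces A's three sequential tier scans (and unreachable fallback) by one keyed min
-- over ALL_STRATEGIES with a 3-valued tier priority; same cost, simpler decomposition.


-- ===== PORT A =====
def pvAllStrategies : List String := ["challenge_bump", "real_world_hook", "context_switch", "micro_break"]

-- Port of A: OVERWHELMED guard, sets, then the three tier scans (each Python
-- `for … return` loop is List.find? over ALL_STRATEGIES) and the fallback.
def select_engagement_strategy (effective_engagement : List String) (ineffective_engagement : List String) (engagement_signal : Option String) (engagement : Option String) : String :=
  if engagement == some "OVERWHELMED" then "micro_break"
  else
    let effective_set := PySem.Set.ofList effective_engagement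
    let ineffective_set := PySem.Set.ofList ineffective_engagement
    match pvAllStrategies.find? (fun s => PySem.Set.contains effective_set s) with
    | some s => s
    | none =>
      match pvAllStrategies.find? (fun s => !PySem.Set.contains effective_set s && !PySem.Set.contains ineffective_set s) with
      | some s => s
      | none =>
        match pvAllStrategies.find? (fun s => PySem.Set.contains ineffective_set s) with
        | some s => s
        | none => "challenge_bump"


-- ===== PORT B =====
-- Port of B: one keyed min over ALL_STRATEGIES with a 3-valued tier priority.
-- PySem.List.min? is Python's min(xs, key=…) (first minimal element); the .getD
-- default is unreachable since pvAllStrategies is a non-empty literal.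
def select_engagement_strategy_alt (effective_engagement : List String) (ineffective_engagement : List String) (engagement_signal : Option String) (engagement : Option String) : String :=
  if engagement == some "OVERWHELMED" then "micro_break"
  else
    let effective_set := PySem.Set.ofList effective_engagement
    let ineffective_set := PySem.Set.ofList ineffective_engagement
    let priority : String → Int := fun s =>
      if PySem.Set.contains effective_set s then 1
      else if PySem.Set.contains ineffective_set s then 3 else 2
    (PySem.List.min? pvAllStrategies priority).getD "micro_break"


-- ===== PRECONDITION & SPEC =====
def Spec_select_engagement_strategy (effective_engagement : List String) (ineffective_engagement : List String) (engagement_signal : Option String) (engagement : Option String) (out : String) : Prop := out = select_engagement_strategy_alt effective_engagement ineffective_engagement engagement_signal engagement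
instance (effective_engagement : List String) (ineffective_engagement : List String) (engagement_signal : Option String) (engagement : Option String) (out : String) : Decidable (Spec_select_engagement_strategy effective_engagement ineffective_engagement engagement_signal engagement out) := by unfold Spec_select_engagement_strategy; infer_instance

-- ===== CLAIM (what is proved, stated in full; the proofs are below) =====
def Claim_equal_select_engagement_strategy : Prop := ∀ (effective_engagement : List String) (ineffective_engagement : List String) (engagement_signal : Option String) (engagement : Option String), Dom_select_engagement_strategy effective_engagement ineffective_engagement engagement_signal engagement → Spec_select_engagement_strategy effective_engagement ineffective_engagement engagement_signal engagement (select_engagement_strategy effective_engagement ineffective_engagement engagement_signal engagement)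

-- ===== LEMMAS AND PROOFS =====
-- ===== VERDICT (by name: the statement is the Claim_ definition above) =====
set_option maxHeartbeats 4000000 in
theorem select_engagement_strategy_spec : Claim_equal_select_engagement_strategy := by
  intro eff ineff sig eng _
  unfold Spec_select_engagement_strategy select_engagement_strategy select_engagement_strategy_alt
  by_cases hov : eng == some "OVERWHELMED"
  · simp [hov]
  · simp only [hov, Bool.false_eq_true, ite_false]
    simp [PySem.List.min?, pysem]
    simp only [pvAllStrategies, List.find?, List.foldl]
    by_cases e1 : "challenge_bump" ∈ eff <;>
      by_cases e2 : "real_world_hook" ∈ eff <;>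
      by_cases e3 : "context_switch" ∈ eff <;>
      by_cases e4 : "micro_break" ∈ eff <;>
      by_cases i1 : "challenge_bump" ∈ ineff <;>
      by_cases i2 : "real_world_hook" ∈ ineff <;>
      by_cases i3 : "context_switch" ∈ ineff <;>
      by_cases i4 : "micro_break" ∈ ineff <;>
      simp [e1, e2, e3, e4, i1, i2, i3, i4]
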